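-- pv_equiv track=rewrite | github.com/AlgoAlgo-ssafy-seoul-9th/19th_study | 세로읽기/성구.py | solution
-- ===== SOURCE A (Python) =====
-- def solution(arr:list) -> str:
--     ans = ""
--     for j in range(max(map(lambda x:len(x), arr))):
--         for i in range(4):
--             if j >= len(arr[i]):
--                 continue
--             ans += arr[i][j]
--     return ans
-- ===== SOURCE B (Python) =====
-- def solution(arr: list) -> str:
--     rows = arr[:4]
--     out = []
--     while any(rows):
--         out.append("".join(r[:1] for r in rows))
--         rows = [r[1:] for r in rows]
--     return "".join(out)
-- ===== Notes on version B (the rewrite author's own statement) =====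
-- stated objective: alternative
-- what changed: B transposes the first four strings by repeatedly peeling off the leading character of each remaining row (a while-loop over suffixes with join) instead of A's double loop indexing arr[i][j] with explicit bounds checks and char-by-char string concatenation; Pre_ excludes exactly the inputs where A raises (empty list: ValueError from max; fewer than 4 strings with a nonempty one: IndexError at arr[i]).
import Mathlib
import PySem

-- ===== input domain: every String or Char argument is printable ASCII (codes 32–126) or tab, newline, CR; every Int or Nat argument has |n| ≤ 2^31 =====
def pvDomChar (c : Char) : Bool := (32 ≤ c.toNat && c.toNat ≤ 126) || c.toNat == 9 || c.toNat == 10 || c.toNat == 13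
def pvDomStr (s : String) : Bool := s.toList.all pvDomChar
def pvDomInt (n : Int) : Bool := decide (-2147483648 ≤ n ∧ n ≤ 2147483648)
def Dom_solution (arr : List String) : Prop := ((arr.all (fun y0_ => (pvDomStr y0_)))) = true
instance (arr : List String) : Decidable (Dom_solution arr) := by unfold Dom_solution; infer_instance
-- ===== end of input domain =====

-- B transposes the first four rows by repeatedly peeling off leading characters
-- instead of double-indexed loops with bounds checks (objective: alternative decomposition).

-- ===== PORT A =====
-- j-loop over range(max(len)) with an inner i-loop over range(4), appending arr[i][j] when in range.
def solution (arr : List String) : String :=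
  let L : List (List Char) := arr.map String.toList
  let m : Nat := L.foldl (fun acc r => max acc r.length) 0
  String.ofList ((List.range m).foldl (fun ans j =>
      (List.range 4).foldl (fun ans i =>
        let row := L.getD i []
        if j ≥ row.length then ans
        else ans ++ [row.getD j ' ']) ans) [])

-- ===== PORT B =====
-- termination measure lemmas for the while-loop (cited by peel's decreasing_by)
theorem pvSumDropLe (rows : List (List Char)) :
    ((rows.map (List.drop 1)).map List.length).sum ≤ (rows.map List.length).sum := by
  induction rows with
  | nil => simp
  | cons r rs ih =>
    simp only [List.map_cons, List.sum_cons]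
    exact Nat.add_le_add (by simp) ih

theorem pvSumDropLt (rows : List (List Char))
    (h : rows.any (fun r => !r.isEmpty) = true) :
    ((rows.map (List.drop 1)).map List.length).sum < (rows.map List.length).sum := by
  induction rows with
  | nil => simp at h
  | cons r rs ih =>
    simp only [List.any_cons, Bool.or_eq_true] at h
    simp only [List.map_cons, List.sum_cons]
    rcases h with h | h
    · have hr : r ≠ [] := by
        intro hr; subst hr; simp at h
      have : (List.drop 1 r).length < r.length := by
        cases r with
        | nil => exact absurd rfl hr
        | cons a t => simp
      exact Nat.add_lt_add_of_lt_of_le this (pvSumDropLe rs)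
    · exact Nat.add_lt_add_of_le_of_lt (by simp) (ih h)

-- 'while any(rows): out.append(heads); rows = tails'
def peel (rows : List (List Char)) : List Char :=
  if hA : rows.any (fun r => !r.isEmpty) = true then
    (rows.map (List.take 1)).flatten ++ peel (rows.map (List.drop 1))
  else []
termination_by (rows.map List.length).sum
decreasing_by simpa [← List.drop_one] using pvSumDropLt rows hA

def solution_alt (arr : List String) : String :=
  String.ofList (peel ((arr.take 4).map String.toList))

-- ===== PRECONDITION & SPEC =====
-- Pre_ excludes exactly the inputs on which A raises: the empty list (ValueError from max)
-- and lists of fewer than 4 strings containing a nonempty string (IndexError at arr[i]).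
def Pre_solution (arr : List String) : Prop :=
  arr ≠ [] ∧ (4 ≤ arr.length ∨ ∀ s ∈ arr, s = "")
instance (arr : List String) : Decidable (Pre_solution arr) := by
  unfold Pre_solution; infer_instance

def pvWitness_solution : List String := (["ab", "c", "", "xyz"])

def Spec_solution (arr : List String) (out : String) : Prop := out = solution_alt arr
instance (arr : List String) (out : String) : Decidable (Spec_solution arr out) := by
  unfold Spec_solution; infer_instance

-- ===== CLAIM (what is proved, stated in full; the proofs are below) =====
def Claim_equal_solution : Prop :=
  ∀ (arr : List String), Dom_solution arr → Pre_solution arr → Spec_solution arr (solution arr)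

-- ===== LEMMAS AND PROOFS =====

-- reference: the column j cells, in row order
def cellsAt (rows : List (List Char)) (j : Nat) : List Char :=
  rows.flatMap (fun r => (r[j]?).toList)

theorem cell_eq (r : List Char) (j : Nat) (ans : List Char) :
    (if j ≥ r.length then ans else ans ++ [r.getD j ' ']) = ans ++ (r[j]?).toList := by
  by_cases h : j < r.length
  · simp [Nat.not_le.2 h, List.getD, List.getElem?_eq_getElem h]
  · have hge : r.length ≤ j := Nat.le_of_not_lt h
    simp [if_pos hge, List.getElem?_eq_none hge]

theorem inner_eq (a b c d : List Char) (rest : List (List Char)) (j : Nat) (ans : List Char) :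
    (List.range 4).foldl (fun ans i =>
        let row := (a :: b :: c :: d :: rest).getD i []
        if j ≥ row.length then ans
        else ans ++ [row.getD j ' ']) ans
      = ans ++ cellsAt [a, b, c, d] j := by
  have h4 : List.range 4 = [0, 1, 2, 3] := by decide
  rw [h4]
  simp only [List.foldl_cons, List.foldl_nil, List.getD_cons_zero, List.getD_cons_succ]
  rw [cell_eq, cell_eq, cell_eq, cell_eq]
  simp [cellsAt]

theorem maxLen_eq_zero {rows : List (List Char)}
    (h : ∀ r ∈ rows, r = []) (acc : Nat) :
    rows.foldl (fun acc r => max acc r.length) acc = acc := by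
  induction rows generalizing acc with
  | nil => rfl
  | cons r rs ih =>
    have hr : r = [] := h r (by simp)
    simp only [List.foldl_cons, hr, List.length_nil, Nat.max_zero]
    exact ih (fun x hx => h x (by simp [hx])) acc

theorem le_foldl_max (rows : List (List Char)) (acc : Nat) :
    acc ≤ rows.foldl (fun acc r => max acc r.length) acc := by
  induction rows generalizing acc with
  | nil => exact Nat.le_refl _
  | cons r rs ih => exact Nat.le_trans (Nat.le_max_left _ _) (ih _)

theorem mem_len_le_foldl_max {rows : List (List Char)} {r : List Char}
    (hr : r ∈ rows) (acc : Nat) :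
    r.length ≤ rows.foldl (fun acc r => max acc r.length) acc := by
  induction rows generalizing acc with
  | nil => simp at hr
  | cons x xs ih =>
    rcases List.mem_cons.1 hr with h | h
    · subst h
      exact Nat.le_trans (Nat.le_max_right _ _) (le_foldl_max xs _)
    · exact ih h _

-- heads of all rows = column 0
theorem take_one_flatten (rows : List (List Char)) :
    (rows.map (List.take 1)).flatten = cellsAt rows 0 := by
  induction rows with
  | nil => rfl
  | cons r rs ih =>
    simp only [List.map_cons, List.flatten_cons, cellsAt, List.flatMap_cons] at *
    rw [ih]
    cases r <;> simp

theorem cellsAt_drop (rows : List (List Char)) (j : Nat) :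
    cellsAt (rows.map (List.drop 1)) j = cellsAt rows (j + 1) := by
  simp only [cellsAt, List.flatMap_map]
  apply List.flatMap_congr  -- pointwise
  intro r _
  rw [List.getElem?_drop, Nat.add_comm 1 j]

theorem cellsAt_nil_of_empty {rows : List (List Char)}
    (h : ∀ r ∈ rows, r = []) (j : Nat) : cellsAt rows j = [] := by
  simp only [cellsAt, List.flatMap_eq_nil_iff]
  intro r hr
  rw [h r hr]
  rfl

theorem any_false_all_nil {rows : List (List Char)}
    (h : ¬ rows.any (fun r => !r.isEmpty) = true) : ∀ r ∈ rows, r = [] := by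
  intro r hr
  by_contra hne
  exact h (List.any_eq_true.2 ⟨r, hr, by simp [hne]⟩)

theorem peel_eq (n : Nat) (rows : List (List Char))
    (h : ∀ r ∈ rows, r.length ≤ n) :
    peel rows = ((List.range n).map (cellsAt rows)).flatten := by
  induction n generalizing rows with
  | zero =>
    have hall : ∀ r ∈ rows, r = [] := by
      intro r hr
      exact List.eq_nil_of_length_eq_zero (Nat.le_zero.1 (h r hr))
    rw [peel.eq_def]
    simp [List.any_eq_true]
    intro r hr
    simp [hall r hr]
  | succ n ih =>
    by_cases hany : rows.any (fun r => !r.isEmpty) = true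
    · rw [peel.eq_def, dif_pos hany]
      have hdrop : ∀ r ∈ rows.map (List.drop 1), r.length ≤ n := by
        intro r hr
        rcases List.mem_map.1 hr with ⟨x, hx, rfl⟩
        have := h x hx
        simp only [List.length_drop]
        omega
      rw [ih _ hdrop, take_one_flatten]
      have hrange : List.range (n + 1) = 0 :: (List.range n).map Nat.succ :=
        List.range_succ_eq_map
      rw [hrange]
      simp only [List.map_cons, List.flatten_cons, List.map_map]
      congr 1
      apply congrArg
      apply List.map_congr_left
      intro j _
      exact cellsAt_drop rows j
    · rw [peel.eq_def, dif_neg hany]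
      have hall := any_false_all_nil hany
      symm
      simp only [List.flatten_eq_nil_iff]
      intro l hl
      rcases List.mem_map.1 hl with ⟨j, _, rfl⟩
      exact cellsAt_nil_of_empty hall j

-- ===== VERDICT (by name: the statement is the Claim_ definition above) =====
theorem solution_spec : Claim_equal_solution := by
  intro arr _ hpre
  unfold Spec_solution
  obtain ⟨hne, hdisj⟩ := hpre
  by_cases h4 : 4 ≤ arr.length
  · -- main case: at least four strings
    match arr, h4 with
    | a :: b :: c :: d :: rest, _ =>
      show solution (a :: b :: c :: d :: rest) = solution_alt (a :: b :: c :: d :: rest)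
      simp only [solution, solution_alt]
      rw [show (a :: b :: c :: d :: rest).take 4 = [a, b, c, d] from rfl]
      simp only [List.map_cons, List.map_nil]
      set rows4 : List (List Char) := [a.toList, b.toList, c.toList, d.toList] with hrows4
      set L : List (List Char) :=
        a.toList :: b.toList :: c.toList :: d.toList :: rest.map String.toList with hL
      set m : Nat := L.foldl (fun acc r => max acc r.length) 0 with hm
      have hle : ∀ r ∈ rows4, r.length ≤ m := by
        intro r hr
        apply mem_len_le_foldl_max
        simp only [hrows4, List.mem_cons] at hr
        rcases hr with rfl | rfl | rfl | rfl | h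
        · exact List.mem_cons_self
        · simp [hL]
        · simp [hL]
        · simp [hL]
        · simp at h
      rw [peel_eq m rows4 hle]
      congr 1
      have houter :
          (List.range m).foldl (fun ans j =>
            (List.range 4).foldl (fun ans i =>
              let row := L.getD i []
              if j ≥ row.length then ans
              else ans ++ [row.getD j ' ']) ans) []
          = (List.range m).foldl (fun ans j => ans ++ cellsAt rows4 j) [] := by
        apply List.foldl_ext
        intro ans j _
        exact inner_eq a.toList b.toList c.toList d.toList (rest.map String.toList) j ans
      rw [houter, PySem.List.foldl_append_eq_flatMap]
      simp [List.flatMap_def]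
  · -- remaining case: fewer than four strings, all empty
    have hall : ∀ s ∈ arr, s = "" := by
      rcases hdisj with h | h
      · exact absurd h h4
      · exact h
    have hallL : ∀ r ∈ arr.map String.toList, r = [] := by
      intro r hr
      rcases List.mem_map.1 hr with ⟨s, hs, rfl⟩
      rw [hall s hs]
      rfl
    simp only [solution, solution_alt]
    have hm0 : (arr.map String.toList).foldl (fun acc r => max acc r.length) 0 = 0 :=
      maxLen_eq_zero hallL 0
    rw [hm0]
    rw [peel.eq_def]
    have hfalse : ¬ ((arr.take 4).map String.toList).any (fun r => !r.isEmpty) = true := by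
      intro hx
      rcases List.any_eq_true.1 hx with ⟨r, hr, hbr⟩
      rcases List.mem_map.1 hr with ⟨s, hs, rfl⟩
      rw [hall s (List.mem_of_mem_take hs)] at hbr
      simp at hbr
    rw [dif_neg hfalse]
    rfl
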